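-- pv_equiv track=rewrite | github.com/Animatic-AI-Solutions/kingstons_portal | backend/app/middleware/path_compatibility.py | _convert_to_hyphenated
-- ===== SOURCE A (Python) =====
-- def _convert_to_hyphenated(path: str) -> str:
--     """
--     Convert underscore paths to hyphenated format.
--
--     Examples:
--     - /api/client_groups -> /api/client-groups
--     - /api/product_owners/123 -> /api/product-owners/123
--     - /api/bulk_client_data -> /api/bulk-client-data
--     """
--     # Split path into segments
--     segments = path.split("/")
--
--     # Convert each segment
--     converted_segments = []
--     for segment in segments:
--         # Skip empty segments and numeric IDs
--         if not segment or segment.isdigit():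
--             converted_segments.append(segment)
--         else:
--             # Replace underscores with hyphens
--             converted_segments.append(segment.replace("_", "-"))
--
--     return "/".join(converted_segments)
-- ===== SOURCE B (Python) =====
-- def _convert_to_hyphenated(path: str) -> str:
--     # A single global replace: '_' never occurs in the '/' separator, and the
--     # segments A skips (empty or all-digit) contain no '_' anyway, so the
--     # per-segment split/loop/join is equivalent to one replace.
--     return path.replace("_", "-")
-- ===== Notes on version B (the rewrite author's own statement) =====
-- stated objective: simpler
-- what changed: Replaced the split-into-segments loop (with its empty/digit skip, list accumulation and join) by one global replace of underscores with hyphens, equivalent because the skipped segments contain no underscore and the separator is never an underscore.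
import Mathlib
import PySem

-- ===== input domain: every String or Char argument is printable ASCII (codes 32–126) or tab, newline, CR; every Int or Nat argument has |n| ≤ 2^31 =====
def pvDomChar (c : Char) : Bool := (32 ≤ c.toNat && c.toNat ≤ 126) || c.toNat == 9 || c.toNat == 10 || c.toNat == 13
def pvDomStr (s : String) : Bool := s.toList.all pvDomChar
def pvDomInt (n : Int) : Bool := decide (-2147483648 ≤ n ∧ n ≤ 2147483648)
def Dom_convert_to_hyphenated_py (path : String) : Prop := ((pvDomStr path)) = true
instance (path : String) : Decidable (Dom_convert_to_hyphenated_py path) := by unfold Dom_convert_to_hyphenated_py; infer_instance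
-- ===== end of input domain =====

-- B replaces A's split/skip-loop/join by one global replace("_","-") — simpler; equivalent
-- because the skipped (empty/all-digit) segments contain no '_' and '_' never occurs in '/'.

-- ===== PORT A =====
def convert_to_hyphenated_py (path : String) : String :=
  let segments := PySem.Chars.splitOn path.toList ['/']
  let converted_segments := segments.foldl
    (fun acc segment =>
      if segment.isEmpty || PySem.Chars.strIsdigit segment then
        acc ++ [segment]
      else
        acc ++ [PySem.Chars.replace segment ['_'] ['-']]) []
  String.ofList (PySem.Chars.join ['/'] converted_segments)

-- ===== PORT B =====
def convert_to_hyphenated_py_alt (path : String) : String :=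
  PySem.Str.replace path "_" "-"

-- ===== PRECONDITION & SPEC =====
def Spec_convert_to_hyphenated_py (path : String) (out : String) : Prop := out = convert_to_hyphenated_py_alt path
instance (path : String) (out : String) : Decidable (Spec_convert_to_hyphenated_py path out) := by unfold Spec_convert_to_hyphenated_py; infer_instance

-- ===== CLAIM (what is proved, stated in full; the proofs are below) =====
def Claim_equal_convert_to_hyphenated_py : Prop := ∀ (path : String), Dom_convert_to_hyphenated_py path → Spec_convert_to_hyphenated_py path (convert_to_hyphenated_py path)

-- ===== LEMMAS AND PROOFS =====

-- the single-character substitution '_' ↦ '-'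
def pvSub (c : Char) : Char := if c = '_' then '-' else c

-- spec of splitting on '/': first segment and remaining segments
def pvSplit1 : List Char → List Char × List (List Char)
  | [] => ([], [])
  | c :: t =>
    if c = '/' then ([], (pvSplit1 t).1 :: (pvSplit1 t).2)
    else (c :: (pvSplit1 t).1, (pvSplit1 t).2)

theorem pv_replace_go_eq : ∀ (fuel : Nat) (l acc : List Char), l.length ≤ fuel →
    PySem.Chars.replace.go ['_'] ['-'] fuel l acc = acc.reverse ++ l.map pvSub := by
  intro fuel
  induction fuel with
  | zero =>
    intro l acc h
    have : l = [] := List.eq_nil_of_length_eq_zero (Nat.le_zero.mp h)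
    subst this; simp [PySem.Chars.replace.go]
  | succ f ih =>
    intro l acc h
    cases l with
    | nil => simp [PySem.Chars.replace.go]
    | cons c t =>
      by_cases hc : c = '_'
      · subst hc
        have hpre : List.isPrefixOf ['_'] ('_' :: t) = true := by
          simp [List.isPrefixOf]
        simp only [PySem.Chars.replace.go, hpre, if_pos]
        rw [show List.drop ['_'].length ('_' :: t) = t from rfl,
            show ['-'].reverse ++ acc = '-' :: acc from rfl]
        rw [ih t ('-' :: acc) (by simpa using Nat.lt_succ_iff.mp (by simpa using h))]
        simp [pvSub]
      · have hpre : List.isPrefixOf ['_'] (c :: t) = false := by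
          simp [List.isPrefixOf]; exact fun h' => hc h'.symm
        simp only [PySem.Chars.replace.go, hpre, Bool.false_eq_true, if_false]
        rw [ih t (c :: acc) (by simpa using Nat.lt_succ_iff.mp (by simpa using h))]
        simp [pvSub, hc]

theorem pv_replace_eq_map (l : List Char) :
    PySem.Chars.replace l ['_'] ['-'] = l.map pvSub := by
  simp only [PySem.Chars.replace, List.isEmpty_cons, Bool.false_eq_true, if_false]
  simpa using pv_replace_go_eq l.length l [] (le_refl _)

theorem pv_splitOn_go_eq : ∀ (fuel : Nat) (l cur : List Char) (acc : List (List Char)),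
    l.length ≤ fuel →
    PySem.Chars.splitOn.go ['/'] fuel l cur acc
      = acc.reverse ++ (cur.reverse ++ (pvSplit1 l).1) :: (pvSplit1 l).2 := by
  intro fuel
  induction fuel with
  | zero =>
    intro l cur acc h
    have : l = [] := List.eq_nil_of_length_eq_zero (Nat.le_zero.mp h)
    subst this; simp [PySem.Chars.splitOn.go, pvSplit1]
  | succ f ih =>
    intro l cur acc h
    cases l with
    | nil => simp [PySem.Chars.splitOn.go, pvSplit1]
    | cons c t =>
      by_cases hc : c = '/'
      · subst hc
        have hpre : List.isPrefixOf ['/'] ('/' :: t) = true := by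
          simp [List.isPrefixOf]
        simp only [PySem.Chars.splitOn.go, hpre, if_pos]
        rw [show List.drop ['/'].length ('/' :: t) = t from rfl]
        rw [ih t [] (cur.reverse :: acc) (by simpa using Nat.lt_succ_iff.mp (by simpa using h))]
        simp [pvSplit1]
      · have hpre : List.isPrefixOf ['/'] (c :: t) = false := by
          simp [List.isPrefixOf]; exact fun h' => hc h'.symm
        simp only [PySem.Chars.splitOn.go, hpre, Bool.false_eq_true, if_false]
        rw [ih t (c :: cur) acc (by simpa using Nat.lt_succ_iff.mp (by simpa using h))]
        simp [pvSplit1, hc]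

theorem pv_splitOn_eq (l : List Char) :
    PySem.Chars.splitOn l ['/'] = (pvSplit1 l).1 :: (pvSplit1 l).2 := by
  simpa using pv_splitOn_go_eq (l.length + 1) l [] [] (Nat.le_succ _)

-- join of a cons whose head starts with a character pulls the character out
theorem pv_join_cons_head (sep : List Char) (x : Char) (h : List Char)
    (rest : List (List Char)) :
    PySem.Chars.join sep ((x :: h) :: rest) = x :: PySem.Chars.join sep (h :: rest) := by
  cases rest with
  | nil => simp [PySem.Chars.join_singleton]
  | cons q qs => simp [PySem.Chars.join_cons_cons]

theorem pv_join_map_split1 : ∀ (l : List Char),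
    PySem.Chars.join ['/'] (((pvSplit1 l).1 :: (pvSplit1 l).2).map (List.map pvSub))
      = l.map pvSub := by
  intro l
  induction l with
  | nil => simp [pvSplit1, PySem.Chars.join_singleton]
  | cons c t ih =>
    by_cases hc : c = '/'
    · subst hc
      rw [show pvSplit1 ('/' :: t) = ([], (pvSplit1 t).1 :: (pvSplit1 t).2) from by
        simp [pvSplit1]]
      simp only [List.map_cons, List.map_nil]
      rw [PySem.Chars.join_cons_cons]
      simp only [List.map_cons] at ih
      rw [ih]
      simp [pvSub]
    · rw [show pvSplit1 (c :: t) = (c :: (pvSplit1 t).1, (pvSplit1 t).2) from by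
        simp [pvSplit1, hc]]
      simp only [List.map_cons]
      rw [pv_join_cons_head]
      rw [show (List.map pvSub (pvSplit1 t).1 :: List.map (List.map pvSub) (pvSplit1 t).2)
          = ((pvSplit1 t).1 :: (pvSplit1 t).2).map (List.map pvSub) by simp]
      rw [ih]

-- the per-segment branch of A is the plain character map on every segment
theorem pv_branch_eq_map (seg : List Char) :
    (if seg.isEmpty || PySem.Chars.strIsdigit seg then seg
     else PySem.Chars.replace seg ['_'] ['-']) = seg.map pvSub := by
  split
  · next hskip =>
    rcases Bool.or_eq_true_iff.mp hskip with he | hd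
    · have : seg = [] := by simpa using he
      subst this; simp
    · -- all characters are digits, and '_' is not a digit, so pvSub fixes them
      have hall : ∀ c ∈ seg, PySem.Chars.isdigit c = true := by
        have h2 : ¬seg = [] ∧ ∀ x ∈ seg, PySem.Chars.isdigit x = true := by
          simpa [PySem.Chars.strIsdigit] using hd
        exact h2.2
      conv_lhs => rw [← List.map_id seg]
      apply List.map_congr_left
      intro c hcmem
      have hdig := hall c hcmem
      have : c ≠ '_' := by
        intro hcu; rw [hcu] at hdig
        exact absurd hdig (by decide)
      simp [pvSub, this]
  · exact pv_replace_eq_map seg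

-- ===== VERDICT (by name: the statement is the Claim_ definition above) =====
theorem convert_to_hyphenated_py_spec : Claim_equal_convert_to_hyphenated_py := by
  intro path _
  unfold Spec_convert_to_hyphenated_py convert_to_hyphenated_py convert_to_hyphenated_py_alt
  simp only
  rw [show (fun (acc : List (List Char)) (segment : List Char) =>
        if segment.isEmpty || PySem.Chars.strIsdigit segment then acc ++ [segment]
        else acc ++ [PySem.Chars.replace segment ['_'] ['-']])
      = (fun acc segment => acc ++ [if segment.isEmpty || PySem.Chars.strIsdigit segment
          then segment else PySem.Chars.replace segment ['_'] ['-']]) by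
        funext acc segment; split <;> rfl]
  rw [PySem.List.foldl_append_singleton_eq_map, pv_splitOn_eq]
  rw [show List.map (fun segment =>
        if segment.isEmpty || PySem.Chars.strIsdigit segment then segment
        else PySem.Chars.replace segment ['_'] ['-'])
      ((pvSplit1 path.toList).1 :: (pvSplit1 path.toList).2)
      = ((pvSplit1 path.toList).1 :: (pvSplit1 path.toList).2).map (List.map pvSub) by
        apply List.map_congr_left; intro seg _; exact pv_branch_eq_map seg]
  rw [List.nil_append, pv_join_map_split1]
  have : (PySem.Str.replace path "_" "-").toList = path.toList.map pvSub := by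
    rw [PySem.Str.toList_replace]
    simpa using pv_replace_eq_map path.toList
  rw [← this, String.ofList_toList]
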